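-- pv_equiv track=rewrite | github.com/juanauli/Inversion-Sequences-Consecutive-Patterns-of-Length-4 | consec_detect4.py | detect0001
-- ===== SOURCE A (Python) =====
-- def detect0001(sequence):
--     index = 0
--     while index < len(sequence) - 3:
--         if sequence[index] == sequence[index + 1] == sequence[index + 2] <\
--                 sequence[index + 3]:
--             return True
--         index += 1
--     return False
-- ===== SOURCE B (Python) =====
-- def detect0001(sequence):
--     # Run-length single pass: a window a==b==c<d exists iff a run of >=3
--     # equal consecutive values is immediately followed by a larger element.
--     it = iter(sequence)
--     try:
--         val = next(it)
--     except StopIteration: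
--         return False
--     cnt = 1
--     for x in it:
--         if x == val:
--             cnt += 1
--         else:
--             if cnt >= 3 and val < x:
--                 return True
--             val, cnt = x, 1
--     return False
-- ===== Notes on version B (the rewrite author's own statement) =====
-- stated objective: alternative
-- what changed: Replaces the sliding 4-element window scan (four indexed accesses per position) by a single-pass run-length tracker (current value + consecutive repeat count) that fires when a run of length >= 3 is followed by a larger element.
import Mathlib
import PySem

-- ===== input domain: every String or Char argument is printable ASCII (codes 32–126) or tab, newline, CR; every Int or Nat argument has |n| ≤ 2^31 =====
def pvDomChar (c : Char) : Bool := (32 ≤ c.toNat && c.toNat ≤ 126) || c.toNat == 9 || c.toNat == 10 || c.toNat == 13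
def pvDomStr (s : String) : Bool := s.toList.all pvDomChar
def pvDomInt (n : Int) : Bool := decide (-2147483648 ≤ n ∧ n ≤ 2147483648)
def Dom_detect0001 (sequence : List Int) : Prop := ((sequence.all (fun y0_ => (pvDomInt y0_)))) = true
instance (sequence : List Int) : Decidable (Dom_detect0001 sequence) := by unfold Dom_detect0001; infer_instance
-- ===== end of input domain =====

-- B replaces A's sliding 4-element window by a one-pass run-length tracker; objective: alternative decomposition (same cost).

-- ===== PORT A =====
-- A slides a window over indices; ported as the obvious structural recursion:
-- the window at the current index is the first four elements of the suffix.
def detect0001 (sequence : List Int) : Bool :=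
  match sequence with
  | a :: b :: c :: d :: rest =>
      if a = b ∧ b = c ∧ c < d then true else detect0001 (b :: c :: d :: rest)
  | _ => false

-- ===== PORT B =====
-- run-length loop: `val` is the current value, `cnt` its consecutive repeat count
def detect0001Go (val : Int) (cnt : Nat) : List Int → Bool
  | [] => false
  | x :: rest =>
      if x = val then detect0001Go val (cnt + 1) rest
      else if 3 ≤ cnt ∧ val < x then true
      else detect0001Go x 1 rest

def detect0001_alt (sequence : List Int) : Bool :=
  match sequence with
  | [] => false
  | x :: rest => detect0001Go x 1 rest

-- ===== PRECONDITION & SPEC =====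
def Spec_detect0001 (sequence : List Int) (out : Bool) : Prop := out = detect0001_alt sequence
instance (sequence : List Int) (out : Bool) : Decidable (Spec_detect0001 sequence out) := by unfold Spec_detect0001; infer_instance

-- ===== CLAIM (what is proved, stated in full; the proofs are below) =====
def Claim_equal_detect0001 : Prop := ∀ (sequence : List Int), Dom_detect0001 sequence → Spec_detect0001 sequence (detect0001 sequence)

-- ===== LEMMAS AND PROOFS =====

-- dropping one leading element that differs from the next does not change A
theorem detectA_cons1 (v x : Int) (rest : List Int) (h : v ≠ x) :
    detect0001 (v :: x :: rest) = detect0001 (x :: rest) := by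
  match rest with
  | [] => rfl
  | [d] => rfl
  | d :: e :: r2 =>
      simp [detect0001]
      intro hvx
      exact absurd hvx h

theorem detectA_cons2 (v x : Int) (rest : List Int) (h : v ≠ x) :
    detect0001 (v :: v :: x :: rest) = detect0001 (x :: rest) := by
  match rest with
  | [] => rfl
  | d :: r =>
      rw [show detect0001 (v :: v :: x :: d :: r)
            = if v = v ∧ v = x ∧ x < d then true else detect0001 (v :: x :: d :: r) from rfl]
      rw [if_neg (by tauto), detectA_cons1 v x (d :: r) h]

theorem detectA_cons3 (v x : Int) (rest : List Int) (h : v ≠ x) :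
    detect0001 (v :: v :: v :: x :: rest) = (decide (v < x) || detect0001 (x :: rest)) := by
  rw [show detect0001 (v :: v :: v :: x :: rest)
        = if v = v ∧ v = v ∧ v < x then true else detect0001 (v :: v :: x :: rest) from rfl]
  by_cases hlt : v < x
  · rw [if_pos ⟨rfl, rfl, hlt⟩]; simp [hlt]
  · rw [if_neg (by tauto), detectA_cons2 v x rest h]
    simp [hlt]

-- main invariant: the run-length loop equals A run on (min cnt 3) copies of val
theorem go_eq_detectA (l : List Int) : ∀ (v : Int) (c : Nat),
    detect0001Go v c l = detect0001 (List.replicate (min c 3) v ++ l) := by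
  induction l with
  | nil =>
      intro v c
      have h : min c 3 = 0 ∨ min c 3 = 1 ∨ min c 3 = 2 ∨ min c 3 = 3 := by omega
      rcases h with h | h | h | h <;> simp [h, detect0001Go, detect0001, List.replicate]
  | cons x rest ih =>
      intro v c
      by_cases hx : x = v
      · subst hx
        rw [show detect0001Go x c (x :: rest) = detect0001Go x (c + 1) rest from by
              simp [detect0001Go], ih]
        by_cases hc : 3 ≤ c
        · have h1 : min c 3 = 3 := by omega
          have h2 : min (c + 1) 3 = 3 := by omega
          rw [h1, h2]
          have hstep : detect0001 (List.replicate 3 x ++ x :: rest)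
              = detect0001 (List.replicate 3 x ++ rest) := by
            simp only [List.replicate, List.cons_append, List.nil_append]
            rw [show detect0001 (x :: x :: x :: x :: rest)
                  = if x = x ∧ x = x ∧ x < x then true else detect0001 (x :: x :: x :: rest) from rfl]
            simp
          rw [hstep]
        · have h1 : min c 3 = c := by omega
          have h2 : min (c + 1) 3 = c + 1 := by omega
          rw [h1, h2, List.replicate_succ', List.append_assoc]
          rfl
      · rw [show detect0001Go v c (x :: rest)
              = if 3 ≤ c ∧ v < x then true else detect0001Go x 1 rest from by
              simp [detect0001Go, hx]]
        have hvx : v ≠ x := fun h => hx h.symm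
        by_cases hc : 3 ≤ c
        · have h1 : min c 3 = 3 := by omega
          rw [h1]
          show _ = detect0001 (v :: v :: v :: x :: rest)
          rw [detectA_cons3 v x rest hvx]
          by_cases hlt : v < x
          · simp [hlt, hc]
          · rw [if_neg (by tauto), ih x 1]
            simp [hlt]
        · rw [if_neg (by tauto), ih x 1]
          have h : min c 3 = 0 ∨ min c 3 = 1 ∨ min c 3 = 2 := by omega
          rcases h with h | h | h
          · rw [h]; rfl
          · rw [h]
            exact (detectA_cons1 v x rest hvx).symm
          · rw [h]
            exact (detectA_cons2 v x rest hvx).symm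

theorem detectA_eq_alt (s : List Int) : detect0001 s = detect0001_alt s := by
  match s with
  | [] => rfl
  | x :: rest =>
      rw [show detect0001_alt (x :: rest) = detect0001Go x 1 rest from rfl,
          go_eq_detectA rest x 1]
      rfl

-- ===== VERDICT (by name: the statement is the Claim_ definition above) =====
theorem detect0001_spec : Claim_equal_detect0001 := by
  intro s _
  exact detectA_eq_alt s
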